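-- pv_equiv track=rewrite | github.com/AvrilMZ/Teoria_de_Algoritmos | Actividades/RPL/4 - Programacion Dinamica/ej9.py | crear_opt
-- ===== SOURCE A (Python) =====
-- def crear_opt(elementos, v):
-- 	OPT = [[0] * (v + 1) for _ in range(len(elementos) + 1)]
-- 	for i in range(1, len(elementos) + 1):
-- 		for j in range(1, v + 1):
-- 			if elementos[i - 1] <= j:
-- 				OPT[i][j] = max(OPT[i - 1][j - elementos[i - 1]] + elementos[i - 1], OPT[i - 1][j])
-- 			else:
-- 				OPT[i][j] = OPT[i - 1][j]
-- 	return OPT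
-- ===== SOURCE B (Python) =====
-- def crear_opt(elementos, v):
-- 	memo = {}
-- 	def opt(i, j):
-- 		if i == 0 or j == 0:
-- 			return 0
-- 		if (i, j) in memo:
-- 			return memo[(i, j)]
-- 		e = elementos[i - 1]
-- 		if e <= j:
-- 			res = max(opt(i - 1, j - e) + e, opt(i - 1, j))
-- 		else:
-- 			res = opt(i - 1, j)
-- 		memo[(i, j)] = res
-- 		return res
-- 	return [[opt(i, j) for j in range(v + 1)] for i in range(len(elementos) + 1)]
-- ===== Notes on version B (the rewrite author's own statement) =====
-- stated objective: alternative
-- what changed: Bottom-up nested-loop table fill replaced by a top-down memoized recursion opt(i,j) over the (i,j) grid; the table is produced by a comprehension querying opt at every cell.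
import Mathlib
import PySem

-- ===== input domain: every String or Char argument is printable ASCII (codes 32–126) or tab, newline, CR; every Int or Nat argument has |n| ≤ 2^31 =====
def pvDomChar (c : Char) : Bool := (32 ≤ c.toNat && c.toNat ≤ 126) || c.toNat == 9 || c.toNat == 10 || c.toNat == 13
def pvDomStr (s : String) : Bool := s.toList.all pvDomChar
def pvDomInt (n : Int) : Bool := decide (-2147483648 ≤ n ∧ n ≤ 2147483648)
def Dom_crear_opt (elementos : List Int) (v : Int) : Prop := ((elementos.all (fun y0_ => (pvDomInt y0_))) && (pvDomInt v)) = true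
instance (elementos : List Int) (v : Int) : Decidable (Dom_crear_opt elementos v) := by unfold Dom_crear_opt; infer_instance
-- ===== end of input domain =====

-- B replaces A's bottom-up nested-loop table fill by a top-down memoized recursion opt(i,j),
-- the table being produced by querying opt at every grid cell (objective: alternative decomposition).

-- ===== PORT A =====
def crear_opt (elementos : List Int) (v : Int) : List (List Int) :=
  let OPT0 : List (List Int) :=
    (List.range (elementos.length + 1)).map (fun _ => List.replicate (v + 1).toNat 0)
  (PySem.List.pyRange 1 ((elementos.length : Int) + 1) 1).foldl (fun OPT i =>
    (PySem.List.pyRange 1 (v + 1) 1).foldl (fun OPT j =>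
      let e := PySem.List.pyGetD elementos (i - 1) 0
      let prev := PySem.List.pyGetD OPT (i - 1) []
      let newv := if e ≤ j then
          max (PySem.List.pyGetD prev (j - e) 0 + e) (PySem.List.pyGetD prev j 0)
        else PySem.List.pyGetD prev j 0
      PySem.List.pySetD OPT i (PySem.List.pySetD (PySem.List.pyGetD OPT i []) j newv)) OPT) OPT0

-- ===== PORT B =====
-- opt(i, j): memoized in Source B; the cache does not change the computed values, so the port is the plain recursion.
def optB (elementos : List Int) : Nat → Int → Int
  | 0, _ => 0
  | i + 1, j =>
    if j = 0 then 0
    else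
      let e := PySem.List.pyGetD elementos (i : Int) 0
      if e ≤ j then max (optB elementos i (j - e) + e) (optB elementos i j)
      else optB elementos i j

def crear_opt_alt (elementos : List Int) (v : Int) : List (List Int) :=
  (List.range (elementos.length + 1)).map (fun i =>
    (PySem.List.pyRange 0 (v + 1) 1).map (fun j => optB elementos i j))

-- ===== PRECONDITION & SPEC =====
-- Pre_ excludes exactly the inputs where A raises IndexError (v >= 1 together with a negative element,
-- which makes A read OPT[i-1][j-e] beyond the row); A returns on every input admitted here.
def Pre_crear_opt (elementos : List Int) (v : Int) : Prop :=
  v ≤ 0 ∨ ∀ e ∈ elementos, 0 ≤ e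
instance (elementos : List Int) (v : Int) : Decidable (Pre_crear_opt elementos v) := by
  unfold Pre_crear_opt; infer_instance
def pvWitness_crear_opt : List Int × Int := ([2, 3, 4], 6)

def Spec_crear_opt (elementos : List Int) (v : Int) (out : List (List Int)) : Prop := out = crear_opt_alt elementos v
instance (elementos : List Int) (v : Int) (out : List (List Int)) : Decidable (Spec_crear_opt elementos v out) := by unfold Spec_crear_opt; infer_instance

-- ===== CLAIM (what is proved, stated in full; the proofs are below) =====
def Claim_equal_crear_opt : Prop := ∀ (elementos : List Int) (v : Int), Dom_crear_opt elementos v → Pre_crear_opt elementos v → Spec_crear_opt elementos v (crear_opt elementos v)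

-- ===== LEMMAS AND PROOFS =====

-- Proof-only helper definitions (names for the pieces of the two ports).
def zRow (v : Int) : List Int := List.replicate (v + 1).toNat 0

def rowB (es : List Int) (v : Int) (i : Nat) : List Int :=
  (PySem.List.pyRange 0 (v + 1) 1).map (fun j => optB es i j)

def prow (es : List Int) (v : Int) (i : Nat) (t : Int) : List Int :=
  (PySem.List.pyRange 0 (v + 1) 1).map (fun j => if j ≤ t then optB es i j else 0)

def tbl (es : List Int) (f : Nat → List Int) : List (List Int) :=
  (List.range (es.length + 1)).map f

def stepA (es : List Int) (OPT : List (List Int)) (i j : Int) : List (List Int) :=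
  PySem.List.pySetD OPT i (PySem.List.pySetD (PySem.List.pyGetD OPT i []) j
    (if PySem.List.pyGetD es (i - 1) 0 ≤ j then
      max (PySem.List.pyGetD (PySem.List.pyGetD OPT (i - 1) []) (j - PySem.List.pyGetD es (i - 1) 0) 0
          + PySem.List.pyGetD es (i - 1) 0)
        (PySem.List.pyGetD (PySem.List.pyGetD OPT (i - 1) []) j 0)
    else PySem.List.pyGetD (PySem.List.pyGetD OPT (i - 1) []) j 0))

def rowLoop (es : List Int) (v : Int) (OPT : List (List Int)) (i : Int) : List (List Int) :=
  (PySem.List.pyRange 1 (v + 1) 1).foldl (fun OPT j => stepA es OPT i j) OPT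

theorem crear_opt_eq (es : List Int) (v : Int) :
    crear_opt es v =
      (PySem.List.pyRange 1 ((es.length : Int) + 1) 1).foldl (rowLoop es v)
        (tbl es (fun _ => zRow v)) := rfl

theorem alt_eq (es : List Int) (v : Int) :
    crear_opt_alt es v = tbl es (fun i => rowB es v i) := rfl

theorem optB_zero (es : List Int) (i : Nat) : optB es i 0 = 0 := by
  cases i <;> simp [optB]

theorem optB_succ (es : List Int) (m : Nat) (j : Int) (hj : j ≠ 0) :
    optB es (m + 1) j =
      (if PySem.List.pyGetD es (m : Int) 0 ≤ j then
        max (optB es m (j - PySem.List.pyGetD es (m : Int) 0) + PySem.List.pyGetD es (m : Int) 0)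
          (optB es m j)
      else optB es m j) := by
  simp [optB, hj]

theorem tbl_congr (es : List Int) (f g : Nat → List Int)
    (h : ∀ k, k ≤ es.length → f k = g k) : tbl es f = tbl es g := by
  unfold tbl
  exact List.map_congr_left (fun k hk2 => h k (by simpa [Nat.lt_succ_iff] using List.mem_range.mp hk2))

theorem tbl_getD (es : List Int) (f : Nat → List Int) (k : Nat) (hk : k ≤ es.length) :
    PySem.List.pyGetD (tbl es f) (k : Int) [] = f k := by
  rw [PySem.List.pyGetD_natCast]
  exact PySem.List.getD_map_range f _ k [] (by omega)

theorem tbl_set (es : List Int) (f : Nat → List Int) (k : Nat) (hk : k ≤ es.length)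
    (r : List Int) :
    PySem.List.pySetD (tbl es f) (k : Int) r = tbl es (fun k' => if k' = k then r else f k') := by
  rw [PySem.List.pySetD_of_nonneg _ _ (by positivity), Int.toNat_natCast]
  unfold tbl
  apply List.ext_getElem
  · simp
  · intro i _ h2
    simp only [List.getElem_set, List.getElem_map, List.getElem_range]
    rcases eq_or_ne k i with h | h
    · rw [if_pos h, if_pos h.symm]
    · rw [if_neg h, if_neg h.symm]

theorem rowB_getD (es : List Int) (v : Int) (i : Nat) (j : Int) (h0 : 0 ≤ j) (h1 : j ≤ v) :
    PySem.List.pyGetD (rowB es v i) j 0 = optB es i j := by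
  unfold rowB
  exact PySem.List.pyGetD_map_pyRange_of_nonneg _ _ _ _ h0 (by omega)

theorem rowB_zero (es : List Int) (v : Int) : rowB es v 0 = zRow v := by
  unfold rowB zRow
  rw [List.map_congr_left (g := fun _ => (0 : Int)) (fun a _ => by simp [optB])]
  simp [List.map_const', PySem.List.length_pyRange_one]

theorem prow_zero (es : List Int) (v : Int) (i : Nat) : prow es v i 0 = zRow v := by
  unfold prow zRow
  rw [List.map_congr_left (g := fun _ => (0 : Int)) (fun a ha => by
    rcases PySem.List.mem_pyRange_one.mp ha with ⟨h1, h2⟩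
    by_cases h : a ≤ 0
    · have : a = 0 := by omega
      simp [this, optB_zero]
    · simp [h])]
  simp [List.map_const', PySem.List.length_pyRange_one]

theorem prow_top (es : List Int) (v : Int) (i : Nat) (t : Int) (ht : v ≤ t) :
    prow es v i t = rowB es v i := by
  unfold prow rowB
  exact List.map_congr_left (fun a ha => by
    rcases PySem.List.mem_pyRange_one.mp ha with ⟨h1, h2⟩
    simp [show a ≤ t by omega])

theorem prow_set (es : List Int) (v : Int) (i : Nat) (t : Int) (h0 : 0 ≤ t) (h1 : t + 1 ≤ v) :
    PySem.List.pySetD (prow es v i t) (t + 1) (optB es i (t + 1)) = prow es v i (t + 1) := by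
  rw [PySem.List.pySetD_of_nonneg _ _ (by omega)]
  unfold prow
  apply List.ext_getElem
  · simp
  · intro k hk1 hk2
    simp only [List.getElem_set, List.getElem_map, PySem.List.getElem_pyRange_one]
    have hkd : ((0 : Int) + (k : Int)) = (k : Int) := by ring
    rw [hkd]
    by_cases hke : (t + 1).toNat = k
    · have hk : (k : Int) = t + 1 := by omega
      simp [hke, hk]
    · have hk : (k : Int) ≠ t + 1 := by omega
      have : ((k : Int) ≤ t + 1) ↔ ((k : Int) ≤ t) := by omega
      simp [hke, this]

theorem inner_fold (es : List Int) (v : Int) (hnn : ∀ e ∈ es, 0 ≤ e)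
    (m : Nat) (hm : m < es.length) (g : Nat → List Int)
    (hgm : g m = rowB es v m) (hgm1 : g (m + 1) = zRow v)
    (t : Nat) (ht : (t : Int) ≤ v) :
    (PySem.List.pyRange 1 ((t : Int) + 1) 1).foldl
        (fun OPT j => stepA es OPT ((m : Int) + 1) j) (tbl es g)
      = tbl es (fun k => if k = m + 1 then prow es v (m + 1) (t : Int) else g k) := by
  induction t with
  | zero =>
    rw [PySem.List.pyRange_one_eq_nil (by omega)]
    simp only [List.foldl_nil]
    apply tbl_congr
    intro k hk
    by_cases h : k = m + 1
    · subst h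
      rw [if_pos rfl, Nat.cast_zero, prow_zero]
      exact hgm1
    · simp [h]
  | succ t ih =>
    have ht' : (t : Int) ≤ v := by push_cast at ht ⊢; omega
    have hj1 : (1 : Int) ≤ (t : Int) + 1 := by omega
    rw [show (((t + 1 : Nat) : Int) + 1) = ((t : Int) + 1) + 1 by push_cast; ring,
      PySem.List.pyRange_one_succ_right hj1, List.foldl_append, ih ht']
    set gt : Nat → List Int := fun k => if k = m + 1 then prow es v (m + 1) (t : Int) else g k with hgt
    simp only [List.foldl_cons, List.foldl_nil]
    -- compute one step of A at row m+1, column t+1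
    unfold stepA
    have hmm : ((m : Int) + 1 - 1) = ((m : Nat) : Int) := by ring
    have hgetm : PySem.List.pyGetD (tbl es gt) ((m : Nat) : Int) [] = rowB es v m := by
      rw [tbl_getD es gt m (by omega)]
      simp [hgt, hgm]
    have hgetm1 : PySem.List.pyGetD (tbl es gt) ((m : Int) + 1) [] = prow es v (m + 1) (t : Int) := by
      rw [show ((m : Int) + 1) = (((m + 1 : Nat)) : Int) by push_cast; ring,
        tbl_getD es gt (m + 1) (by omega)]
      simp [hgt]
    have he_mem : PySem.List.pyGetD es ((m : Nat) : Int) 0 ∈ es := by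
      rw [PySem.List.pyGetD_natCast, List.getD_eq_getElem _ _ hm]
      exact List.getElem_mem hm
    have he0 : 0 ≤ PySem.List.pyGetD es ((m : Nat) : Int) 0 := hnn _ he_mem
    set e : Int := PySem.List.pyGetD es ((m : Nat) : Int) 0 with hee
    have hjne : ((t : Int) + 1) ≠ 0 := by omega
    have hnewv :
        (if e ≤ (t : Int) + 1 then
          max (PySem.List.pyGetD (rowB es v m) ((t : Int) + 1 - e) 0 + e)
            (PySem.List.pyGetD (rowB es v m) ((t : Int) + 1) 0)
        else PySem.List.pyGetD (rowB es v m) ((t : Int) + 1) 0) = optB es (m + 1) ((t : Int) + 1) := by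
      rw [optB_succ es m ((t : Int) + 1) hjne]
      by_cases hle : e ≤ (t : Int) + 1
      · rw [if_pos hle, if_pos (hee ▸ hle),
          rowB_getD es v m _ (by omega) (by omega),
          rowB_getD es v m _ (by omega) (by omega)]
      · rw [if_neg hle, if_neg (hee ▸ hle),
          rowB_getD es v m _ (by omega) (by omega)]
    rw [hmm, hgetm, hgetm1, ← hee, hnewv,
      show (((t + 1 : Nat)) : Int) = (t : Int) + 1 by push_cast; ring,
      prow_set es v (m + 1) (t : Int) (by omega) (by omega),
      show ((m : Int) + 1) = (((m + 1 : Nat)) : Int) by push_cast; ring,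
      tbl_set es gt (m + 1) (by omega)]
    apply tbl_congr
    intro k hk
    by_cases h : k = m + 1
    · subst h
      simp
    · simp [h, hgt]

theorem outer_fold (es : List Int) (v : Int) (hnn : ∀ e ∈ es, 0 ≤ e) (hv : 0 ≤ v)
    (m : Nat) (hm : m ≤ es.length) :
    (PySem.List.pyRange 1 ((m : Int) + 1) 1).foldl (rowLoop es v) (tbl es (fun _ => zRow v))
      = tbl es (fun k => if k ≤ m then rowB es v k else zRow v) := by
  induction m with
  | zero =>
    rw [PySem.List.pyRange_one_eq_nil (by omega)]
    simp only [List.foldl_nil]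
    apply tbl_congr
    intro k hk
    by_cases h : k = 0
    · subst h
      simp [rowB_zero]
    · simp [h]
  | succ m ih =>
    have hm' : m ≤ es.length := by omega
    rw [show (((m + 1 : Nat) : Int) + 1) = ((m : Int) + 1) + 1 by push_cast; ring,
      PySem.List.pyRange_one_succ_right (by omega), List.foldl_append, ih hm']
    simp only [List.foldl_cons, List.foldl_nil]
    unfold rowLoop
    have hvt : v + 1 = ((v.toNat : Nat) : Int) + 1 := by omega
    rw [hvt, inner_fold es v hnn m (by omega) _
      (by simp) (by simp) v.toNat (by omega)]
    apply tbl_congr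
    intro k hk
    by_cases h : k = m + 1
    · subst h
      rw [if_pos rfl, if_pos (by omega), prow_top es v (m + 1) _ (by omega)]
    · have : (k ≤ m + 1) ↔ (k ≤ m) := by omega
      simp [h, this]

theorem easy_foldl (es : List Int) (v : Int) (hv : v ≤ 0) (is : List Int)
    (T : List (List Int)) : is.foldl (rowLoop es v) T = T := by
  induction is generalizing T with
  | nil => rfl
  | cons i is ih =>
    simp only [List.foldl_cons]
    rw [show rowLoop es v T i = T by
      unfold rowLoop
      rw [PySem.List.pyRange_one_eq_nil (by omega)]
      rfl, ih]

theorem zRow_eq_rowB (es : List Int) (v : Int) (hv : v ≤ 0) (k : Nat) :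
    zRow v = rowB es v k := by
  rcases lt_or_eq_of_le hv with h | h
  · unfold zRow rowB
    rw [PySem.List.pyRange_one_eq_nil (by omega)]
    simp [show (v + 1).toNat = 0 by omega]
  · subst h
    unfold zRow rowB
    rw [show ((0 : Int) + 1) = 0 + 1 by ring, PySem.List.pyRange_one_singleton]
    simp [optB_zero]



-- ===== VERDICT (by name: the statement is the Claim_ definition above) =====
theorem crear_opt_spec : Claim_equal_crear_opt := by
  intro es v _ hpre
  unfold Spec_crear_opt
  rw [crear_opt_eq, alt_eq]
  by_cases hv : v ≤ 0
  · rw [easy_foldl es v hv]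
    exact tbl_congr es _ _ (fun k _ => zRow_eq_rowB es v hv k)
  · have hnn : ∀ e ∈ es, 0 ≤ e := hpre.resolve_left hv
    rw [outer_fold es v hnn (by omega) es.length le_rfl]
    exact tbl_congr es _ _ (fun k hk => by simp [hk])
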